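-- pv_equiv track=rewrite | github.com/VoSeq/VoSeq | voseq/core/utils.py | get_gap_indexes
-- ===== SOURCE A (Python) =====
-- def get_gap_indexes(seq_obj):
--     """If - is found not forming gap codons, it will be replaced by ? and
--     the new sequence will be returned with this replacemen.
--     """
--     indexes_for_gaps_in_translated_sequence = []
--     new_sequence = ''
--
--     i = 0
--     for index in range((len(seq_obj) // 3) + 1):
--         j = i + 3
--         tmp = str(seq_obj[i:j])
--         if tmp.find('---') == 0:
--             indexes_for_gaps_in_translated_sequence.append(index)
--         elif '-' in tmp:
--             tmp = tmp.replace('-', '?')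
--         new_sequence += tmp
--         i += 3
--     return indexes_for_gaps_in_translated_sequence, new_sequence
-- ===== SOURCE B (Python) =====
-- def get_gap_indexes(seq_obj):
--     s = str(seq_obj)
--     n = len(s)
--     gaps = [k for k in range(n // 3)
--             if s[3 * k] == '-' and s[3 * k + 1] == '-' and s[3 * k + 2] == '-']
--     gapset = set(gaps)
--     new_sequence = ''.join(
--         '?' if c == '-' and i // 3 not in gapset else c
--         for i, c in enumerate(s)
--     )
--     return gaps, new_sequence
-- ===== Notes on version B (the rewrite author's own statement) =====
-- stated objective: alternative
-- what changed: Replaces A's codon-chunking accumulator loop (slice each 3-char codon, test it with find, replace inside the chunk, concatenate) by a character-level algorithm: first compute the gap codon positions by direct 3-character index probes over range(n//3), then build the new sequence in one per-character pass that masks a dash exactly when its codon index is not in the precomputed gap set.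
import Mathlib
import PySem

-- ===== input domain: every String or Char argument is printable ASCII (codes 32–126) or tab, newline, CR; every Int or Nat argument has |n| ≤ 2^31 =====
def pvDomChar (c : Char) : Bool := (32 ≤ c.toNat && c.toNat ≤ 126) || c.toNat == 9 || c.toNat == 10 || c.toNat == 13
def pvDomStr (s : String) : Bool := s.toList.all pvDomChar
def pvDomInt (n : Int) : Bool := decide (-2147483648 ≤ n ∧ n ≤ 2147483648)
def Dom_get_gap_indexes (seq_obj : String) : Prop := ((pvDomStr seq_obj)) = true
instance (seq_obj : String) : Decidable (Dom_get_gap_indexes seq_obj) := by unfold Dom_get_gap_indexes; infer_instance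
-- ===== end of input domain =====

-- B replaces A's codon-chunking accumulator loop by index probes for the gap codons plus a
-- per-character masking pass against the precomputed gap set (objective: alternative algorithm, same cost).


-- ===== PORT A =====
-- loop body of A: state = (indexes_for_gaps_in_translated_sequence, new_sequence (as chars), i)
def pyAstep (s : List Char) (st : List Int × List Char × Int) (index : Int) :
    List Int × List Char × Int :=
  let i := st.2.2
  let j := i + 3
  let tmp := PySem.Chars.slice s (some i) (some j)
  if PySem.Chars.find tmp ['-', '-', '-'] = 0 then
    (st.1 ++ [index], st.2.1 ++ tmp, i + 3)
  else if PySem.Chars.isIn ['-'] tmp then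
    (st.1, st.2.1 ++ PySem.Chars.replace tmp ['-'] ['?'], i + 3)
  else
    (st.1, st.2.1 ++ tmp, i + 3)

def get_gap_indexes (seq_obj : String) : List Int × String :=
  let res := (PySem.List.pyRange 0 (PySem.Int.floordiv (PySem.Str.len seq_obj) 3 + 1) 1).foldl
      (pyAstep seq_obj.toList) ([], [], 0)
  (res.1, String.ofList res.2.1)

-- ===== PORT B =====
-- gaps = [k for k in range(n // 3) if s[3*k] == '-' and s[3*k+1] == '-' and s[3*k+2] == '-']
def pvGapsB (seq_obj : String) : List Int :=
  (PySem.List.pyRange 0 (PySem.Int.floordiv (PySem.Str.len seq_obj) 3) 1).filter (fun k =>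
    PySem.List.pyGet? seq_obj.toList (3 * k) == some '-' &&
    PySem.List.pyGet? seq_obj.toList (3 * k + 1) == some '-' &&
    PySem.List.pyGet? seq_obj.toList (3 * k + 2) == some '-')

-- new_sequence = ''.join('?' if c == '-' and i // 3 not in gapset else c for i, c in enumerate(s))
def get_gap_indexes_alt (seq_obj : String) : List Int × String :=
  let gaps := pvGapsB seq_obj
  let gapset := PySem.Set.ofList gaps
  let new_sequence := (PySem.List.enumerate seq_obj.toList 0).map (fun ic =>
    if ic.2 == '-' && !(PySem.Set.contains gapset (PySem.Int.floordiv ic.1 3)) then '?' else ic.2)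
  (gaps, String.ofList new_sequence)

-- ===== PRECONDITION & SPEC =====
def Spec_get_gap_indexes (seq_obj : String) (out : List Int × String) : Prop := out = get_gap_indexes_alt seq_obj
instance (seq_obj : String) (out : List Int × String) : Decidable (Spec_get_gap_indexes seq_obj out) := by unfold Spec_get_gap_indexes; infer_instance

-- ===== CLAIM (what is proved, stated in full; the proofs are below) =====
def Claim_equal_get_gap_indexes : Prop := ∀ (seq_obj : String), Dom_get_gap_indexes seq_obj → Spec_get_gap_indexes seq_obj (get_gap_indexes seq_obj)

-- ===== LEMMAS AND PROOFS =====

def pvGap : List Char := ['-', '-', '-']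

def pvMask (c : List Char) : List Char :=
  if PySem.Chars.find c pvGap = 0 then c
  else if PySem.Chars.isIn ['-'] c then PySem.Chars.replace c ['-'] ['?']
  else c

def pvRep (c : Char) : Char := if c = '-' then '?' else c

def pvGapB (s : List Char) (k : Nat) : Bool := decide ((s.drop (3 * k)).take 3 = pvGap)

def pvGapIdxs (k : Int) : List (List Char) → List Int
  | [] => []
  | c :: cs => if c = pvGap then k :: pvGapIdxs (k + 1) cs else pvGapIdxs (k + 1) cs

def pvChunks (s : List Char) (i : Nat) : Nat → List (List Char)
  | 0 => []
  | n + 1 => (s.drop i).take 3 :: pvChunks s (i + 3) n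

def pvF (seq_obj : String) (ic : Int × Char) : Char :=
  if ic.2 == '-' && !(PySem.Set.contains (PySem.Set.ofList (pvGapsB seq_obj)) (PySem.Int.floordiv ic.1 3)) then '?' else ic.2

-- find(tmp, '---') == 0 ⇔ tmp == '---' for codons (length ≤ 3)
lemma pv_find0_iff (c : List Char) (hc : c.length ≤ 3) :
    PySem.Chars.find c pvGap = 0 ↔ c = pvGap := by
  constructor
  · intro h
    have hne : PySem.Chars.findFrom c pvGap ((0 : Nat) : Int) ≠ -1 := by
      simp [PySem.Chars.findFrom_zero, h]
    obtain ⟨-, hpre, -⟩ :=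
      PySem.Chars.findFrom_natCast_spec c pvGap 0 (Nat.zero_le _) hne
    simp [PySem.Chars.findFrom_zero, h] at hpre
    have hlen : pvGap.length = c.length := by
      have := hpre.length_le
      simp [pvGap] at this ⊢
      omega
    exact (hpre.eq_of_length hlen).symm
  · intro h
    subst h
    decide

lemma pv_maskA_eq (c : List Char) :
    (if PySem.Chars.find c pvGap = 0 then c
     else if PySem.Chars.isIn ['-'] c then PySem.Chars.replace c ['-'] ['?'] else c)
    = pvMask c := rfl

-- A's fold, characterized chunkwise
lemma pv_foldA (s : List Char) (n : Nat) :
    ∀ (k i : Nat) (acc1 : List Int) (acc2 : List Char),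
    (PySem.List.pyRange (k : Int) ((k : Int) + (n : Int)) 1).foldl (pyAstep s)
        (acc1, acc2, (i : Int))
    = (acc1 ++ pvGapIdxs k (pvChunks s i n),
       acc2 ++ ((pvChunks s i n).map pvMask).flatten,
       ((i + 3 * n : Nat) : Int)) := by
  induction n with
  | zero =>
    intro k i acc1 acc2
    rw [PySem.List.pyRange_one_eq_nil (by simp)]
    simp [pvChunks, pvGapIdxs]
  | succ m ih =>
    intro k i acc1 acc2
    rw [PySem.List.pyRange_one_cons (by push_cast; omega)]
    have hrest : (k : Int) + 1 = ((k + 1 : Nat) : Int) := by push_cast; ring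
    have hend : (k : Int) + ((m + 1 : Nat) : Int) = ((k + 1 : Nat) : Int) + (m : Nat) := by
      push_cast; ring
    have htmp : PySem.Chars.slice s (some (i : Int)) (some ((i : Int) + 3))
        = (s.drop i).take 3 := by
      have h3 : ((i : Int) + 3) = ((i : Int) + ((3 : Nat) : Int)) := by norm_num
      rw [PySem.Chars.slice_eq_listSlice, h3, PySem.List.slice_natCast_add]
    have hlen : ((s.drop i).take 3).length ≤ 3 := by
      simp [List.length_take]
    simp only [List.foldl_cons]
    have hstep : pyAstep s (acc1, acc2, (i : Int)) (k : Int)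
        = (acc1 ++ (if (s.drop i).take 3 = pvGap then [(k : Int)] else []),
           acc2 ++ pvMask ((s.drop i).take 3), ((i + 3 : Nat) : Int)) := by
      simp only [pyAstep, htmp, show (['-', '-', '-'] : List Char) = pvGap from rfl]
      rw [← pv_maskA_eq]
      have hcast : (i : Int) + 3 = ((i + 3 : Nat) : Int) := by push_cast; ring
      by_cases h : (s.drop i).take 3 = pvGap
      · rw [if_pos ((pv_find0_iff _ hlen).mpr h), if_pos ((pv_find0_iff _ hlen).mpr h),
          if_pos h, hcast]
      · have hf : ¬ PySem.Chars.find ((s.drop i).take 3) pvGap = 0 :=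
          fun h0 => h ((pv_find0_iff _ hlen).mp h0)
        rw [if_neg hf, if_neg hf, if_neg h, hcast]
        cases hi : PySem.Chars.isIn ['-'] ((s.drop i).take 3) <;> simp
    rw [hstep, hend, hrest, ih (k + 1) (i + 3)]
    have hc : ((k : Int) + 1) = ((k + 1 : Nat) : Int) := by push_cast; ring
    have hn : i + 3 + 3 * m = i + 3 * (m + 1) := by ring
    simp only [pvChunks, pvGapIdxs, List.map_cons, List.flatten_cons, hc, hn]
    by_cases h : (s.drop i).take 3 = pvGap <;> simp [h, List.append_assoc]

lemma pv_A_eq (seq_obj : String) :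
    get_gap_indexes seq_obj
    = (pvGapIdxs 0 (pvChunks seq_obj.toList 0 (seq_obj.toList.length / 3 + 1)),
       String.ofList (((pvChunks seq_obj.toList 0 (seq_obj.toList.length / 3 + 1)).map pvMask).flatten)) := by
  unfold get_gap_indexes
  simp only []
  have h1 : PySem.Int.floordiv (PySem.Str.len seq_obj) 3 + 1
      = (((seq_obj.toList.length / 3 + 1 : Nat)) : Int) := by
    rw [PySem.Str.len_eq]
    rw [show ((3 : Int)) = ((3 : Nat) : Int) by norm_num]
    rw [PySem.Int.floordiv_natCast]
    push_cast; ring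
  rw [h1]
  rw [show ((((seq_obj.toList.length / 3 + 1 : Nat)) : Int))
      = (((0 : Nat) : Int) + (((seq_obj.toList.length / 3 + 1 : Nat)) : Int)) by norm_num]
  rw [show (0 : Int) = ((0 : Nat) : Int) from rfl]
  rw [pv_foldA seq_obj.toList (seq_obj.toList.length / 3 + 1) 0 0 [] []]
  simp

-- ---- replacing a single '-' by '?' is a character map ----
lemma pv_go_rep (fuel : Nat) :
    ∀ (l acc : List Char), l.length ≤ fuel →
    PySem.Chars.replace.go ['-'] ['?'] fuel l acc = acc.reverse ++ l.map pvRep := by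
  induction fuel with
  | zero =>
    intro l acc h
    have hl : l = [] := List.eq_nil_of_length_eq_zero (by omega)
    subst hl
    simp [PySem.Chars.replace.go]
  | succ f ih =>
    intro l acc h
    cases l with
    | nil => simp [PySem.Chars.replace.go]
    | cons c t =>
      have hunf : PySem.Chars.replace.go ['-'] ['?'] (f + 1) (c :: t) acc
          = if (['-'] : List Char).isPrefixOf (c :: t)
            then PySem.Chars.replace.go ['-'] ['?'] f (List.drop (['-'] : List Char).length (c :: t)) (['?'].reverse ++ acc)
            else PySem.Chars.replace.go ['-'] ['?'] f t (c :: acc) := rfl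
      by_cases hc : c = '-'
      · rw [hunf, if_pos (by simp [List.isPrefixOf, hc])]
        simp only [List.length_cons, List.length_nil, Nat.zero_add, List.drop_succ_cons,
          List.drop_zero, List.reverse_singleton, List.singleton_append]
        rw [ih t ('?' :: acc) (by simp at h; omega)]
        simp [pvRep, hc]
      · rw [hunf, if_neg (by simp [List.isPrefixOf]; exact fun h' => hc h'.symm)]
        rw [ih t (c :: acc) (by simp at h; omega)]
        simp [pvRep, hc]

lemma pv_replace_eq_map (c : List Char) :
    PySem.Chars.replace c ['-'] ['?'] = c.map pvRep := by
  unfold PySem.Chars.replace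
  rw [if_neg (by simp)]
  rw [pv_go_rep c.length c [] le_rfl]
  simp

lemma pv_singleton_infix (c : List Char) : (['-'] : List Char) <:+: c ↔ '-' ∈ c := by
  constructor
  · intro h
    exact h.subset (by simp)
  · intro h
    obtain ⟨l1, l2, rfl⟩ := List.append_of_mem h
    exact ⟨l1, l2, by simp⟩

lemma pv_mask_eq_map (c : List Char) (hc : c.length ≤ 3) :
    pvMask c = if c = pvGap then c else c.map pvRep := by
  unfold pvMask
  by_cases h : c = pvGap
  · rw [if_pos ((pv_find0_iff c hc).mpr h), if_pos h]
  · rw [if_neg (fun h0 => h ((pv_find0_iff c hc).mp h0)), if_neg h]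
    cases hi : PySem.Chars.isIn ['-'] c
    · have hnm : '-' ∉ c := by
        intro hm
        have ht := (PySem.Chars.isIn_iff_infix (['-'] : List Char) c).2
          ((pv_singleton_infix c).mpr hm)
        rw [hi] at ht
        cases ht
      have hmap : c.map pvRep = c := by
        conv_rhs => rw [← List.map_id c]
        apply List.map_congr_left
        intro a ha
        have : a ≠ '-' := fun he => hnm (he ▸ ha)
        simp [pvRep, this]
      exact hmap.symm
    · exact pv_replace_eq_map c

-- ---- the gap test via index probes ----
lemma pv_take3_gap_iff (s : List Char) (m : Nat) :
    (s.drop m).take 3 = pvGap ↔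
      (s[m]? = some '-' ∧ s[m + 1]? = some '-' ∧ s[m + 2]? = some '-') := by
  have h0 : s[m]? = (s.drop m)[0]? := by simp [List.getElem?_drop]
  have h1 : s[m + 1]? = (s.drop m)[1]? := by simp [List.getElem?_drop]
  have h2 : s[m + 2]? = (s.drop m)[2]? := by simp [List.getElem?_drop]
  rw [h0, h1, h2]
  rcases hd : s.drop m with _ | ⟨a, _ | ⟨b, _ | ⟨c, r⟩⟩⟩ <;>
    simp [pvGap, List.take]

lemma pv_gapB_bound (s : List Char) (k : Nat) (h : pvGapB s k = true) :
    3 * k + 3 ≤ s.length := by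
  have h3 : ((s.drop (3 * k)).take 3).length = 3 := by
    unfold pvGapB at h
    rw [of_decide_eq_true h]
    rfl
  simp [List.length_take] at h3
  omega

lemma pv_gapsB_eq (seq_obj : String) :
    pvGapsB seq_obj
    = ((List.range (seq_obj.toList.length / 3)).filter (fun k => pvGapB seq_obj.toList k)).map
        (fun k : Nat => (k : Int)) := by
  unfold pvGapsB
  have hflr : PySem.Int.floordiv (PySem.Str.len seq_obj) 3
      = (((seq_obj.toList.length / 3 : Nat)) : Int) := by
    rw [PySem.Str.len_eq]
    exact_mod_cast PySem.Int.floordiv_natCast seq_obj.toList.length 3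
  rw [hflr, PySem.List.pyRange_one,
    show ((((seq_obj.toList.length / 3 : Nat)) : Int) - 0).toNat = seq_obj.toList.length / 3 by omega,
    List.filter_map]
  have hfil : (List.range (seq_obj.toList.length / 3)).filter
        ((fun k =>
            PySem.List.pyGet? seq_obj.toList (3 * k) == some '-' &&
            PySem.List.pyGet? seq_obj.toList (3 * k + 1) == some '-' &&
            PySem.List.pyGet? seq_obj.toList (3 * k + 2) == some '-') ∘ (fun k : Nat => (0 : Int) + (k : Int)))
      = (List.range (seq_obj.toList.length / 3)).filter (fun k => pvGapB seq_obj.toList k) := by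
    apply List.filter_congr
    intro k hk
    simp only [Function.comp_apply]
    have c1 : (3 : Int) * ((0 : Int) + (k : Int)) + 1 = ((3 * k + 1 : Nat) : Int) := by
      push_cast; ring
    have c2 : (3 : Int) * ((0 : Int) + (k : Int)) + 2 = ((3 * k + 2 : Nat) : Int) := by
      push_cast; ring
    have c0 : (3 : Int) * ((0 : Int) + (k : Int)) = ((3 * k : Nat) : Int) := by
      push_cast; ring
    rw [c1, c2, c0, PySem.List.pyGet?_natCast, PySem.List.pyGet?_natCast,
      PySem.List.pyGet?_natCast]
    unfold pvGapB
    rw [Bool.eq_iff_iff]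
    simp [pv_take3_gap_iff, and_assoc]
  rw [hfil]
  apply List.map_congr_left
  intro k _
  norm_num

lemma pv_contains_gaps (seq_obj : String) (k : Nat) :
    PySem.Set.contains (PySem.Set.ofList (pvGapsB seq_obj)) ((k : Nat) : Int)
      = pvGapB seq_obj.toList k := by
  rw [Bool.eq_iff_iff, PySem.Set.contains_iff, PySem.Set.mem_ofList, pv_gapsB_eq]
  simp only [List.mem_map, List.mem_filter, List.mem_range]
  constructor
  · rintro ⟨j, ⟨-, hj⟩, hjk⟩
    have hje : j = k := by exact_mod_cast hjk
    subst hje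
    exact hj
  · intro h
    refine ⟨k, ⟨?_, h⟩, rfl⟩
    have := pv_gapB_bound _ _ h
    omega

-- ---- gap indexes: chunkwise = filtered range ----
lemma pv_gapIdxs_filter (s : List Char) (m : Nat) :
    ∀ (k : Nat),
    pvGapIdxs ((k : Nat) : Int) (pvChunks s (3 * k) m)
      = ((List.range' k m).filter (fun j => pvGapB s j)).map (fun j : Nat => (j : Int)) := by
  induction m with
  | zero => intro k; simp [pvChunks, pvGapIdxs]
  | succ n ih =>
    intro k
    rw [List.range'_succ]
    simp only [pvChunks, pvGapIdxs, List.filter_cons]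
    have h3 : 3 * k + 3 = 3 * (k + 1) := by ring
    have hc : ((k : Nat) : Int) + 1 = ((k + 1 : Nat) : Int) := by push_cast; ring
    by_cases h : (s.drop (3 * k)).take 3 = pvGap
    · rw [if_pos h]
      have hb : pvGapB s k = true := decide_eq_true h
      rw [hb, if_pos rfl, List.map_cons, hc, h3, ih (k + 1)]
    · rw [if_neg h]
      have hb : pvGapB s k = false := decide_eq_false h
      rw [hb, if_neg (by simp), hc, h3, ih (k + 1)]

lemma pv_gapB_last (s : List Char) : pvGapB s (s.length / 3) = false := by
  cases hx : pvGapB s (s.length / 3)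
  · rfl
  · have := pv_gapB_bound s (s.length / 3) hx
    omega

-- ---- masked chunks, flattened = per-character pass ----
lemma pv_enum_map_pointwise {α β : Type} (F : Int × α → β) (G : α → β) :
    ∀ (xs : List α) (s0 : Int),
    (∀ (k : Nat) (hk : k < xs.length), F (s0 + (k : Int), xs[k]) = G xs[k]) →
    (PySem.List.enumerate xs s0).map F = xs.map G := by
  intro xs
  induction xs with
  | nil => intro s0 _; simp [PySem.List.enumerate_nil]
  | cons x t ih =>
    intro s0 h
    rw [PySem.List.enumerate_cons]
    simp only [List.map_cons]
    congr 1
    · have := h 0 (by simp)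
      simpa using this
    · apply ih
      intro k hk
      have := h (k + 1) (by simp; omega)
      simpa [add_assoc, add_comm, add_left_comm] using this

lemma pvMask_nil : pvMask ([] : List Char) = [] := by decide

lemma pv_chunks_flat_nil (s : List Char) (m : Nat) :
    ∀ (i : Nat), s.length ≤ i → ((pvChunks s i m).map pvMask).flatten = [] := by
  induction m with
  | zero => intro i _; simp [pvChunks]
  | succ n ih =>
    intro i hi
    have hd : s.drop i = [] := List.drop_eq_nil_of_le hi
    simp only [pvChunks, List.map_cons, List.flatten_cons, hd, List.take_nil, pvMask_nil,
      List.nil_append]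
    exact ih (i + 3) (by omega)

lemma pv_chunk_map (seq_obj : String) (k : Nat) :
    (PySem.List.enumerate ((seq_obj.toList.drop (3 * k)).take 3) (((3 * k : Nat)) : Int)).map (pvF seq_obj)
      = pvMask ((seq_obj.toList.drop (3 * k)).take 3) := by
  set s := seq_obj.toList with hs
  set C := (s.drop (3 * k)).take 3 with hC
  have hlen : C.length ≤ 3 := by simp [hC, List.length_take]
  have hpoint : ∀ (j : Nat) (hj : j < C.length),
      pvF seq_obj ((((3 * k : Nat)) : Int) + (j : Int), C[j])
        = (fun c => if c == '-' && !(pvGapB s k) then '?' else c) C[j] := by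
    intro j hj
    unfold pvF
    simp only []
    have hidx : (((3 * k : Nat)) : Int) + (j : Int) = ((3 * k + j : Nat) : Int) := by
      push_cast; ring
    have hdiv : PySem.Int.floordiv (((3 * k + j : Nat)) : Int) 3 = ((k : Nat) : Int) := by
      rw [show ((3 : Int)) = ((3 : Nat) : Int) by norm_num, PySem.Int.floordiv_natCast]
      have : (3 * k + j) / 3 = k := by omega
      rw [this]
    rw [hidx, hdiv, pv_contains_gaps, ← hs]
  rw [pv_enum_map_pointwise (pvF seq_obj) (fun c => if c == '-' && !(pvGapB s k) then '?' else c) C (((3 * k : Nat)) : Int) hpoint, pv_mask_eq_map C hlen]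
  by_cases hg : pvGapB s k = true
  · have hCg : C = pvGap := of_decide_eq_true hg
    rw [if_pos hCg, hg]
    simp
  · have hg' : pvGapB s k = false := by
      cases hx : pvGapB s k
      · rfl
      · exact absurd hx hg
    have hCg : C ≠ pvGap := by
      intro h
      exact hg (decide_eq_true h)
    rw [if_neg hCg, hg']
    apply List.map_congr_left
    intro a _
    by_cases ha : a = '-' <;> simp [pvRep, ha]

lemma pv_flatten_enum (seq_obj : String) (m : Nat) :
    ∀ (k : Nat),
    ((pvChunks seq_obj.toList (3 * k) m).map pvMask).flatten
      = (PySem.List.enumerate ((seq_obj.toList.drop (3 * k)).take (3 * m))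
          (((3 * k : Nat)) : Int)).map (pvF seq_obj) := by
  induction m with
  | zero =>
    intro k
    simp [pvChunks, PySem.List.enumerate_nil]
  | succ n ih =>
    intro k
    set s := seq_obj.toList with hs
    have hsplit : (s.drop (3 * k)).take (3 * (n + 1))
        = (s.drop (3 * k)).take 3 ++ (s.drop (3 * (k + 1))).take (3 * n) := by
      rw [show 3 * (n + 1) = 3 + 3 * n by ring, List.take_add]
      congr 1
      rw [List.drop_drop]
      congr 1
    rw [hsplit, PySem.List.enumerate_append, List.map_append]
    simp only [pvChunks, List.map_cons, List.flatten_cons]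
    congr 1
    · exact (pv_chunk_map seq_obj k).symm
    · by_cases hfull : 3 * k + 3 ≤ s.length
      · have hCl : ((s.drop (3 * k)).take 3).length = 3 := by
          simp [List.length_take, List.length_drop]
          omega
        rw [hCl]
        have hcast : (((3 * k : Nat)) : Int) + ((3 : Nat) : Int) = ((3 * (k + 1) : Nat) : Int) := by
          push_cast; ring
        rw [show ((3 : Nat) : Int) = (3 : Int) from rfl] at hcast
        rw [show ((3 * k : Nat) : Int) + ((3 : Nat) : Int) = ((3 * (k + 1) : Nat) : Int) from hcast,
          show 3 * k + 3 = 3 * (k + 1) by ring]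
        exact ih (k + 1)
      · have hd : s.drop (3 * (k + 1)) = [] := List.drop_eq_nil_of_le (by omega)
        rw [hd]
        simp only [List.take_nil, PySem.List.enumerate_nil, List.map_nil]
        rw [show 3 * k + 3 = 3 * (k + 1) by ring]
        exact pv_chunks_flat_nil s n (3 * (k + 1)) (by omega)

-- ===== VERDICT (by name: the statement is the Claim_ definition above) =====
theorem get_gap_indexes_spec : Claim_equal_get_gap_indexes := by
  intro seq_obj _
  unfold Spec_get_gap_indexes
  rw [pv_A_eq]
  unfold get_gap_indexes_alt
  simp only []
  set s := seq_obj.toList with hs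
  have hgaps : pvGapIdxs 0 (pvChunks s 0 (s.length / 3 + 1)) = pvGapsB seq_obj := by
    have h0 := pv_gapIdxs_filter s (s.length / 3 + 1) 0
    rw [show (3 * 0 : Nat) = 0 from rfl, show (((0 : Nat)) : Int) = (0 : Int) from rfl] at h0
    rw [h0, pv_gapsB_eq, ← hs]
    rw [← List.range_eq_range', List.range_succ, List.filter_append, List.map_append]
    have hlast : (List.filter (fun j => pvGapB s j) [s.length / 3]) = [] := by
      simp [List.filter, pv_gapB_last s]
    rw [hlast]
    simp
  have hseq : ((pvChunks s 0 (s.length / 3 + 1)).map pvMask).flatten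
      = (PySem.List.enumerate s 0).map (pvF seq_obj) := by
    have h0 := pv_flatten_enum seq_obj (s.length / 3 + 1) 0
    rw [show (3 * 0 : Nat) = 0 from rfl, show (((0 : Nat)) : Int) = (0 : Int) from rfl,
      List.drop_zero, ← hs] at h0
    rw [h0]
    congr 2
    exact List.take_of_length_le (by omega)
  rw [hgaps, hseq]
  rfl
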